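-- pv_equiv track=rewrite | github.com/blaisewang/leetcode | src/568.最大休假天数.py | maxVacationDays
-- ===== SOURCE A (Python) =====
-- from functools import lru_cache
-- from typing import List
--
-- def maxVacationDays(flights: List[List[int]], days: List[List[int]]) -> int:
--     @lru_cache(None)
--     def dp(city: int, week: int) -> int:
--         if week >= len(days[0]):
--             return 0
--         tmp = dp(city, week + 1)
--         for idx in range(len(flights)):
--             if flights[city][idx] == 1:
--                 tmp = max(tmp, dp(idx, week + 1))
--         return days[city][week] + tmp
--
--     r = dp(0, 0)
--     for i in range(len(flights)):
--         if flights[0][i] == 1: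
--             r = max(r, dp(i, 0))
--
--     return r
-- ===== SOURCE B (Python) =====
-- from typing import List
--
-- def maxVacationDays(flights: List[List[int]], days: List[List[int]]) -> int:
--     # bottom-up tabulation over weeks with a rolling array (instead of memoized recursion)
--     n = len(flights)
--     k = len(days[0])
--     dp = [0] * n
--     for week in range(k - 1, -1, -1):
--         ndp = [0] * n
--         for city in range(n):
--             best = dp[city]
--             for idx in range(n):
--                 if flights[city][idx] == 1 and dp[idx] > best:
--                     best = dp[idx]
--             ndp[city] = days[city][week] + best
--         dp = ndp
--     best = dp[0]
--     for i in range(n):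
--         if flights[0][i] == 1 and dp[i] > best:
--             best = dp[i]
--     return best
-- ===== Notes on version B (the rewrite author's own statement) =====
-- stated objective: alternative
-- what changed: Replaces A's memoized top-down recursion (lru_cache dp(city,week)) with iterative bottom-up tabulation over weeks using a rolling array.
-- outside the precondition, e.g. on maxVacationDays([], [[3, 4]]): A returns 7, B raises IndexError; on maxVacationDays([[0, 0], [0]], [[5], [3]]): A returns 5, B raises IndexError
import Mathlib
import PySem

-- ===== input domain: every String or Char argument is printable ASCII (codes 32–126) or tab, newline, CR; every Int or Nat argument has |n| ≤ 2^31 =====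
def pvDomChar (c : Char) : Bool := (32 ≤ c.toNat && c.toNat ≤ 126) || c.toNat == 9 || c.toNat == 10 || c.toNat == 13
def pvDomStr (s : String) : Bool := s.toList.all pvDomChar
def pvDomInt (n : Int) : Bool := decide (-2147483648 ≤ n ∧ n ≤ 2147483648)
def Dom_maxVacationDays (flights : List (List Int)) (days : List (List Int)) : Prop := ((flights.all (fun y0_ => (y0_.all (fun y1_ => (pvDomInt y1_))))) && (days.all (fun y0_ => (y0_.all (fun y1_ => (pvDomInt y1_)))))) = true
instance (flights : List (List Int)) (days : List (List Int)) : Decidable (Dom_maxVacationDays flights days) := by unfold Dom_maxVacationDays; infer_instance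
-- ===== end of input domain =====

-- B replaces A's memoized top-down recursion with iterative bottom-up tabulation over
-- weeks using a rolling array (alternative decomposition, same asymptotic cost).

-- ===== PORT A =====
-- dp(city, week) of A; the lru_cache memoisation only affects speed, not the value,
-- so the port is the plain recursion.  List indexing (always by in-range Nat under
-- Pre_) is ported as getD.
def dpA (flights days : List (List Int)) (city week : Nat) : Int :=
  if _h : (days.getD 0 []).length ≤ week then 0
  else
    let tmp := dpA flights days city (week + 1)
    let tmp := (List.range flights.length).foldl
      (fun t idx => if (flights.getD city []).getD idx 0 = 1
                    then max t (dpA flights days idx (week + 1)) else t) tmp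
    (days.getD city []).getD week 0 + tmp
termination_by (days.getD 0 []).length - week
decreasing_by all_goals omega

def maxVacationDays (flights : List (List Int)) (days : List (List Int)) : Int :=
  let r := dpA flights days 0 0
  (List.range flights.length).foldl
    (fun r i => if (flights.getD 0 []).getD i 0 = 1
                then max r (dpA flights days i 0) else r) r

-- ===== PORT B =====
-- one week of the tabulation: from the table for week+1 build the table for `week`
def stepB (flights days : List (List Int)) (n : Nat) (dp : List Int) (week : Nat) : List Int :=
  (List.range n).map (fun city =>
    let best := (List.range n).foldl
      (fun best idx => if (flights.getD city []).getD idx 0 = 1 ∧ dp.getD idx 0 > best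
                       then dp.getD idx 0 else best) (dp.getD city 0)
    (days.getD city []).getD week 0 + best)

-- `for week in range(k-1, -1, -1)` is the list [k-1, …, 0] = (List.range k).reverse
def maxVacationDays_alt (flights : List (List Int)) (days : List (List Int)) : Int :=
  let n := flights.length
  let k := (days.getD 0 []).length
  let dp := ((List.range k).reverse).foldl (stepB flights days n) (List.replicate n 0)
  (List.range n).foldl
    (fun best i => if (flights.getD 0 []).getD i 0 = 1 ∧ dp.getD i 0 > best
                   then dp.getD i 0 else best) (dp.getD 0 0)

-- ===== PRECONDITION & SPEC =====
-- Pre_ excludes the inputs on which Python A raises (empty flights/short days, a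
-- flights/days row shorter than needed) — and, since reachability of a city is not
-- closed-form, it also asks rows of UNREACHABLE cities to be long enough, excluding
-- some ragged inputs A still returns on (B's tabulation indexes every city's row there).
def Pre_maxVacationDays (flights : List (List Int)) (days : List (List Int)) : Prop :=
  flights ≠ [] ∧ flights.length ≤ days.length ∧
  (∀ row ∈ flights, flights.length ≤ row.length) ∧
  (∀ i < flights.length, (days.getD 0 []).length ≤ (days.getD i []).length)
instance (flights : List (List Int)) (days : List (List Int)) : Decidable (Pre_maxVacationDays flights days) := by unfold Pre_maxVacationDays; infer_instance

def pvWitness_maxVacationDays : List (List Int) × List (List Int) :=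
  ([[0, 1], [1, 0]], [[1, 3], [6, 0]])

def Spec_maxVacationDays (flights : List (List Int)) (days : List (List Int)) (out : Int) : Prop := out = maxVacationDays_alt flights days
instance (flights : List (List Int)) (days : List (List Int)) (out : Int) : Decidable (Spec_maxVacationDays flights days out) := by unfold Spec_maxVacationDays; infer_instance

-- ===== CLAIM (what is proved, stated in full; the proofs are below) =====
def Claim_equal_maxVacationDays : Prop := ∀ (flights : List (List Int)) (days : List (List Int)), Dom_maxVacationDays flights days → Pre_maxVacationDays flights days → Spec_maxVacationDays flights days (maxVacationDays flights days)

-- ===== LEMMAS AND PROOFS =====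

-- the table B maintains: city ↦ dp(city, week)
def tblB (flights days : List (List Int)) (n week : Nat) : List Int :=
  (List.range n).map (fun c => dpA flights days c week)

lemma getD_map_range' {f : Nat → Int} {n i : Nat} (h : i < n) (d : Int) :
    (((List.range n).map f).getD i d) = f i := by
  rw [List.getD_eq_getElem?_getD, List.getElem?_map, List.getElem?_range h]
  rfl

lemma max_eq_if (a b : Int) : max a b = if b > a then b else a := by
  split_ifs <;> omega

-- one step of B applied to the week+1 table yields the week table
lemma stepB_tbl (flights days : List (List Int)) (w : Nat)
    (hw : w < (days.getD 0 []).length) :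
    stepB flights days flights.length (tblB flights days flights.length (w + 1)) w
      = tblB flights days flights.length w := by
  unfold stepB tblB
  apply List.map_congr_left
  intro c hc
  rw [List.mem_range] at hc
  rw [dpA, dif_neg (by omega : ¬ (days.getD 0 []).length ≤ w)]
  dsimp only
  congr 1
  rw [getD_map_range' hc]
  apply PySem.List.foldl_congr_mem
  intro acc idx hidx
  rw [List.mem_range] at hidx
  rw [getD_map_range' hidx, max_eq_if]
  split_ifs <;> omega

lemma fold_weeks (flights days : List (List Int)) (k : Nat)
    (hk : k ≤ (days.getD 0 []).length) :
    (((List.range k).reverse).foldl (stepB flights days flights.length)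
        (tblB flights days flights.length k))
      = tblB flights days flights.length 0 := by
  induction k with
  | zero => simp
  | succ m ih =>
    rw [List.range_succ, List.reverse_append, List.reverse_singleton,
        List.singleton_append, List.foldl_cons, stepB_tbl flights days m (by omega)]
    exact ih (by omega)

lemma tbl_top (flights days : List (List Int)) :
    List.replicate flights.length (0 : Int)
      = tblB flights days flights.length ((days.getD 0 []).length) := by
  have h : ∀ c ∈ List.range flights.length,
      dpA flights days c ((days.getD 0 []).length) = (0 : Int) := by
    intro c _
    rw [dpA]
    simp
  unfold tblB
  rw [List.map_congr_left h, List.map_const', List.length_range]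

theorem maxVacationDays_spec_aux (flights days : List (List Int))
    (hne : flights ≠ []) :
    maxVacationDays flights days = maxVacationDays_alt flights days := by
  have hn : 0 < flights.length := List.length_pos_of_ne_nil hne
  simp only [maxVacationDays, maxVacationDays_alt]
  rw [tbl_top flights days, fold_weeks flights days _ le_rfl]
  unfold tblB
  rw [getD_map_range' hn]
  apply PySem.List.foldl_congr_mem
  intro acc i hi
  rw [List.mem_range] at hi
  rw [getD_map_range' hi, max_eq_if]
  split_ifs <;> omega

-- ===== VERDICT (by name: the statement is the Claim_ definition above) =====
theorem maxVacationDays_spec : Claim_equal_maxVacationDays := by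
  intro flights days _ hpre
  exact (maxVacationDays_spec_aux flights days hpre.1).symm ▸ rfl
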